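-- pv_equiv track=rewrite | github.com/dsc-courses/practice.dsc10.com | run.py | _normalize_from_lecture
-- ===== SOURCE A (Python) =====
-- _ASSET_ROOTS = ("assets/", "pdfs/", "static/")
--
-- def _normalize_from_lecture(url: str) -> str:
--     """Make asset/link URLs correct from docs/lectures/lecN/index.html."""
--     # ignore absolute, anchors, data URIs
--     if "://" in url or url.startswith(("data:", "#")):
--         return url
--
--     for root in _ASSET_ROOTS:
--         # already correct for lecN page depth
--         if url.startswith(f"../../{root}"):
--             return url
--         # common cases we need to bump up one level
--         if url.startswith(f"../{root}"):
--             return f"../{url}"                # -> ../../root...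
--         if url.startswith(f"./{root}"):
--             return f"../../{url[2:]}"         # ./assets/... -> ../../assets/...
--         if url.startswith(root):
--             return f"../../{url}"             # assets/... -> ../../assets/...
--     return url
-- ===== SOURCE B (Python) =====
-- _ASSET_ROOTS = ("assets/", "pdfs/", "static/")
--
--
-- def _normalize_from_lecture(url: str) -> str:
--     """Make asset/link URLs correct from docs/lectures/lecN/index.html."""
--     if "://" in url or url.startswith(("data:", "#")):
--         return url
--     # Segment view: split the path, classify the leading run of '.'/'..'
--     # segments, and rewrite iff that run is one of the four allowed shapes
--     # and the next segment is an asset root followed by a '/'.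
--     parts = url.split("/")
--     k = 0
--     while k < len(parts) and parts[k] in (".", ".."):
--         k += 1
--     if (parts[:k] in ([], ["."], [".."], ["..", ".."])
--             and k + 1 < len(parts)
--             and parts[k] in ("assets", "pdfs", "static")):
--         return "../../" + "/".join(parts[k:])
--     return url
-- ===== Notes on version B (the rewrite author's own statement) =====
-- stated objective: alternative
-- what changed: B abandons prefix string matching entirely: it splits the URL into slash-separated segments, counts the leading run of dot/dot-dot segments with a while loop, checks that the run is one of the four legal shapes and that the next segment is an asset root followed by a separator, and rejoins the tail segments under the two-levels-up prefix.
import Mathlib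
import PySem

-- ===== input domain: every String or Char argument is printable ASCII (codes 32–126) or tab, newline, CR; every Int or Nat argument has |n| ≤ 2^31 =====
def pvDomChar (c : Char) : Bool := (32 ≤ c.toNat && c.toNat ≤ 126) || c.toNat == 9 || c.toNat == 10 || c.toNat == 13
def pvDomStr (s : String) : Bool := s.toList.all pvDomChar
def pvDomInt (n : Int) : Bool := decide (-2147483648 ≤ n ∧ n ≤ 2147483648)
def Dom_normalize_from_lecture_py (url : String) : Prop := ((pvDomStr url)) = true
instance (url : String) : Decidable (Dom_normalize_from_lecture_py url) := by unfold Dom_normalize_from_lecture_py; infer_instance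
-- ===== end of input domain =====

-- B replaces A's per-root prefix matching by a segment view: split the URL on '/',
-- classify the leading run of '.'/'..' segments, and rejoin (objective: alternative
-- decomposition; same behaviour, same cost).

-- ===== PORT A =====
-- 'for root in _ASSET_ROOTS:' with its four startswith branches, in source order
def nflLoopA (u : List Char) : List (List Char) → List Char
  | [] => u
  | root :: roots =>
    if PySem.Chars.startswith u ("../../".toList ++ root) then u
    else if PySem.Chars.startswith u ("../".toList ++ root) then "../".toList ++ u
    else if PySem.Chars.startswith u ("./".toList ++ root) then "../../".toList ++ u.drop 2  -- url[2:]
    else if PySem.Chars.startswith u root then "../../".toList ++ u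
    else nflLoopA u roots

def normalize_from_lecture_py (url : String) : String :=
  if PySem.Str.isIn "://" url || PySem.Str.startswith url "data:" || PySem.Str.startswith url "#" then url
  else String.ofList (nflLoopA url.toList ["assets/".toList, "pdfs/".toList, "static/".toList])

-- ===== PORT B =====
-- parts[k] in (".", "..")
def nflIsDot (s : List Char) : Bool := s == ['.'] || s == ['.', '.']
-- the while loop advancing k over the leading run of '.'/'..' segments
def nflRun : List (List Char) → Nat
  | [] => 0
  | s :: rest => if nflIsDot s then nflRun rest + 1 else 0
-- parts[:k] in ([], ["."], [".."], ["..", ".."])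
def nflAllowed (l : List (List Char)) : Bool :=
  l == ([] : List (List Char)) || l == [['.']] || l == [['.', '.']] || l == [['.', '.'], ['.', '.']]
-- parts[k] in ("assets", "pdfs", "static")
def nflRootSeg (s : List Char) : Bool :=
  s == ['a', 's', 's', 'e', 't', 's'] || s == ['p', 'd', 'f', 's'] || s == ['s', 't', 'a', 't', 'i', 'c']
-- the body after 'parts = url.split("/")': compute k, test, rejoin
def nflGo (parts : List (List Char)) (u : List Char) : List Char :=
  if nflAllowed (parts.take (nflRun parts)) && decide (nflRun parts + 1 < parts.length)
      && nflRootSeg (parts.getD (nflRun parts) []) then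
    "../../".toList ++ List.intercalate ['/'] (parts.drop (nflRun parts))
  else u

def normalize_from_lecture_py_alt (url : String) : String :=
  if PySem.Str.isIn "://" url || PySem.Str.startswith url "data:" || PySem.Str.startswith url "#" then url
  else String.ofList (nflGo (url.toList.splitOn '/') url.toList)

-- ===== PRECONDITION & SPEC =====
def Spec_normalize_from_lecture_py (url : String) (out : String) : Prop := out = normalize_from_lecture_py_alt url
instance (url : String) (out : String) : Decidable (Spec_normalize_from_lecture_py url out) := by unfold Spec_normalize_from_lecture_py; infer_instance

-- ===== CLAIM (what is proved, stated in full; the proofs are below) =====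
def Claim_equal_normalize_from_lecture_py : Prop := ∀ (url : String), Dom_normalize_from_lecture_py url → Spec_normalize_from_lecture_py url (normalize_from_lecture_py url)

-- ===== LEMMAS AND PROOFS =====

lemma nfl_npfx_ext {p q u : List Char} (hpq : p <+: q) (h : ¬ p <+: u) : ¬ q <+: u :=
  fun hq => h (hpq.trans hq)

lemma nfl_notpfx {p r t : List Char} (h : ¬ (p ++ r) <+: p ++ t) : ¬ r <+: t := by
  intro hr
  exact h ((List.prefix_append_right_inj p).mpr hr)

-- nflRun counts the leading run of dot segments
lemma nflRun_take : ∀ (l : List (List Char)), l.take (nflRun l) = l.takeWhile nflIsDot := by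
  intro l
  induction l with
  | nil => rfl
  | cons s rest ih =>
    by_cases h : nflIsDot s = true <;> simp [nflRun, List.takeWhile_cons, h, ih]

lemma nflRun_drop : ∀ (l : List (List Char)), l.drop (nflRun l) = l.dropWhile nflIsDot := by
  intro l
  induction l with
  | nil => rfl
  | cons s rest ih =>
    by_cases h : nflIsDot s = true <;> simp [nflRun, List.dropWhile_cons, h, ih]

lemma nflRun_len : ∀ (l : List (List Char)), nflRun l = (l.takeWhile nflIsDot).length := by
  intro l
  induction l with
  | nil => rfl
  | cons s rest ih =>
    by_cases h : nflIsDot s = true <;> simp [nflRun, List.takeWhile_cons, h, ih]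

lemma nfl_getD_drop : ∀ (l : List (List Char)) (n : Nat), l.getD n [] = (l.drop n).headD [] := by
  intro l
  induction l with
  | nil => intro n; cases n <;> rfl
  | cons s rest ih => intro n; cases n with
    | zero => rfl
    | succ m => simpa using ih m

-- nflGo re-expressed through takeWhile / dropWhile
lemma nflGo_eq (parts : List (List Char)) (u : List Char) :
    nflGo parts u =
      if nflAllowed (parts.takeWhile nflIsDot) && decide (1 < (parts.dropWhile nflIsDot).length)
          && nflRootSeg ((parts.dropWhile nflIsDot).headD []) then
        "../../".toList ++ List.intercalate ['/'] (parts.dropWhile nflIsDot)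
      else u := by
  have hlen : (parts.takeWhile nflIsDot).length + (parts.dropWhile nflIsDot).length = parts.length := by
    rw [← List.length_append, List.takeWhile_append_dropWhile]
  have hiff : (nflRun parts + 1 < parts.length) ↔ (1 < (parts.dropWhile nflIsDot).length) := by
    rw [nflRun_len]; omega
  unfold nflGo
  rw [nflRun_take, nflRun_drop, nfl_getD_drop, nflRun_drop]
  simp only [decide_eq_decide.mpr hiff]

-- splitting off one '/'-free chunk
lemma nfl_splitOn_chunk (xs as : List Char) (h : ∀ x ∈ xs, ¬ ((x == '/') = true)) :
    List.splitOn '/' (xs ++ '/' :: as) = xs :: List.splitOn '/' as := by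
  simpa [List.splitOn] using List.splitOnP_first (fun c => c == '/') xs h '/' (by simp) as

lemma nfl_splitOn_ne_nil (t : List Char) : List.splitOn '/' t ≠ [] := by
  simpa [List.splitOn] using List.splitOnP_ne_nil (fun c => c == '/') t

lemma nfl_intercalate_cons₂ (a b : List Char) (l : List (List Char)) :
    List.intercalate ['/'] (a :: b :: l) = a ++ '/' :: List.intercalate ['/'] (b :: l) := by
  simp [List.intercalate, List.intersperse]

-- if the first segment has a successor, segment ++ '/' prefixes the string
lemma nfl_seg_prefix {t : List Char} {h : List Char} {rest : List (List Char)}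
    (hs : List.splitOn '/' t = h :: rest) (hr : rest ≠ []) : (h ++ ['/']) <+: t := by
  obtain ⟨b, l, rfl⟩ := List.exists_cons_of_ne_nil hr
  have ht : t = List.intercalate ['/'] (h :: b :: l) := by
    rw [← hs]; exact (List.intercalate_splitOn t '/').symm
  rw [ht, nfl_intercalate_cons₂]
  exact ⟨List.intercalate ['/'] (b :: l), by simp⟩

-- B leaves u unchanged when no asset root follows a legal dot-run: the four pre shapes

lemma nfl_Bneg_nondot {t u : List Char} {h : List Char} {rest : List (List Char)} (pre : List (List Char))
    (hall : nflAllowed pre = true) (hdots : ∀ s ∈ pre, nflIsDot s = true)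
    (hs : List.splitOn '/' t = h :: rest) (hd : nflIsDot h = false)
    (h1 : ¬ ("assets/".toList <+: t)) (h2 : ¬ ("pdfs/".toList <+: t)) (h3 : ¬ ("static/".toList <+: t)) :
    nflGo (pre ++ List.splitOn '/' t) u = u := by
  rw [hs, nflGo_eq]
  have htw : (pre ++ h :: rest).takeWhile nflIsDot = pre := by
    rw [List.takeWhile_append_of_pos]
    · simp [List.takeWhile_cons, hd]
    · exact fun s hsmem => hdots s hsmem
  have hdw : (pre ++ h :: rest).dropWhile nflIsDot = h :: rest := by
    rw [List.dropWhile_append_of_pos]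
    · simp [List.dropWhile_cons, hd]
    · exact fun s hsmem => hdots s hsmem
  rw [htw, hdw]
  by_cases hroot : nflRootSeg h = true
  · cases rest with
    | nil => simp
    | cons b l =>
      exfalso
      have hpfx : (h ++ ['/']) <+: t := nfl_seg_prefix hs (by simp)
      rcases (by simpa [nflRootSeg] using hroot : (h = ['a', 's', 's', 'e', 't', 's'] ∨ h = ['p', 'd', 'f', 's']) ∨ h = ['s', 't', 'a', 't', 'i', 'c']) with (rfl | rfl) | rfl
      · exact h1 hpfx
      · exact h2 hpfx
      · exact h3 hpfx
  · simp [hroot]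

lemma nfl_Bneg_nil {t u : List Char}
    (h1 : ¬ ("assets/".toList <+: t)) (h2 : ¬ ("pdfs/".toList <+: t)) (h3 : ¬ ("static/".toList <+: t))
    (hdot1 : ¬ ("./".toList <+: t)) (hdot2 : ¬ ("../".toList <+: t)) :
    nflGo (List.splitOn '/' t) u = u := by
  obtain ⟨h, rest, hs⟩ := List.exists_cons_of_ne_nil (nfl_splitOn_ne_nil t)
  by_cases hd : nflIsDot h = true
  · cases rest with
    | nil =>
      rw [hs, nflGo_eq]
      simp [List.takeWhile_cons, List.dropWhile_cons, hd]
    | cons b l =>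
      exfalso
      have hpfx : (h ++ ['/']) <+: t := nfl_seg_prefix hs (by simp)
      rcases (by simpa [nflIsDot] using hd : h = ['.'] ∨ h = ['.', '.']) with rfl | rfl
      · exact hdot1 hpfx
      · exact hdot2 hpfx
  · have := nfl_Bneg_nondot (t := t) (u := u) [] (by rfl) (by simp) hs (Bool.eq_false_iff.mpr hd) h1 h2 h3
    simpa using this

lemma nfl_Bneg_dot1 {t u : List Char}
    (h1 : ¬ ("assets/".toList <+: t)) (h2 : ¬ ("pdfs/".toList <+: t)) (h3 : ¬ ("static/".toList <+: t)) :
    nflGo ([['.']] ++ List.splitOn '/' t) u = u := by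
  obtain ⟨h, rest, hs⟩ := List.exists_cons_of_ne_nil (nfl_splitOn_ne_nil t)
  by_cases hd : nflIsDot h = true
  · rw [hs, nflGo_eq]
    have hne : nflAllowed (List.takeWhile nflIsDot (['.'] :: h :: rest)) = false := by
      rcases (by simpa [nflIsDot] using hd : h = ['.'] ∨ h = ['.', '.']) with rfl | rfl <;>
        simp [List.takeWhile_cons, nflIsDot, nflAllowed]
    simp [hne]
  · exact nfl_Bneg_nondot [['.']] (by rfl) (by simp [nflIsDot]) hs (Bool.eq_false_iff.mpr hd) h1 h2 h3

lemma nfl_Bneg_dot2 {t u : List Char}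
    (h1 : ¬ ("assets/".toList <+: t)) (h2 : ¬ ("pdfs/".toList <+: t)) (h3 : ¬ ("static/".toList <+: t))
    (hdot2 : ¬ ("../".toList <+: t)) :
    nflGo ([['.', '.']] ++ List.splitOn '/' t) u = u := by
  obtain ⟨h, rest, hs⟩ := List.exists_cons_of_ne_nil (nfl_splitOn_ne_nil t)
  by_cases hd : nflIsDot h = true
  · rcases (by simpa [nflIsDot] using hd : h = ['.'] ∨ h = ['.', '.']) with rfl | rfl
    · rw [hs, nflGo_eq]
      simp [List.takeWhile_cons, nflIsDot, nflAllowed]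
    · cases rest with
      | nil =>
        rw [hs, nflGo_eq]
        simp [List.takeWhile_cons, List.dropWhile_cons, nflIsDot]
      | cons b l =>
        exact absurd (nfl_seg_prefix hs (by simp)) hdot2
  · exact nfl_Bneg_nondot [['.', '.']] (by rfl) (by simp [nflIsDot]) hs (Bool.eq_false_iff.mpr hd) h1 h2 h3

lemma nfl_Bneg_dot22 {t u : List Char}
    (h1 : ¬ ("assets/".toList <+: t)) (h2 : ¬ ("pdfs/".toList <+: t)) (h3 : ¬ ("static/".toList <+: t)) :
    nflGo ([['.', '.'], ['.', '.']] ++ List.splitOn '/' t) u = u := by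
  obtain ⟨h, rest, hs⟩ := List.exists_cons_of_ne_nil (nfl_splitOn_ne_nil t)
  by_cases hd : nflIsDot h = true
  · rcases (by simpa [nflIsDot] using hd : h = ['.'] ∨ h = ['.', '.']) with rfl | rfl <;>
      · rw [hs, nflGo_eq]
        simp [List.takeWhile_cons, nflIsDot, nflAllowed]
  · exact nfl_Bneg_nondot [['.', '.'], ['.', '.']] (by rfl) (by simp [nflIsDot]) hs (Bool.eq_false_iff.mpr hd) h1 h2 h3

-- B rewrites correctly when a root with trailing '/' follows a legal dot-run
lemma nfl_Bpos (pre : List (List Char)) (r t2 u : List Char)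
    (hall : nflAllowed pre = true) (hdots : ∀ s ∈ pre, nflIsDot s = true)
    (hroot : nflRootSeg r = true) (hrd : nflIsDot r = false) (hnosl : ∀ x ∈ r, ¬ ((x == '/') = true)) :
    nflGo (pre ++ List.splitOn '/' (r ++ '/' :: t2)) u = "../../".toList ++ r ++ '/' :: t2 := by
  rw [nfl_splitOn_chunk r t2 hnosl, nflGo_eq]
  obtain ⟨q, qs, hq⟩ := List.exists_cons_of_ne_nil (nfl_splitOn_ne_nil t2)
  have htw : (pre ++ r :: List.splitOn '/' t2).takeWhile nflIsDot = pre := by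
    rw [List.takeWhile_append_of_pos]
    · simp [List.takeWhile_cons, hrd]
    · exact fun s hsmem => hdots s hsmem
  have hdw : (pre ++ r :: List.splitOn '/' t2).dropWhile nflIsDot = r :: List.splitOn '/' t2 := by
    rw [List.dropWhile_append_of_pos]
    · simp [List.dropWhile_cons, hrd]
    · exact fun s hsmem => hdots s hsmem
  rw [htw, hdw, hq, nfl_intercalate_cons₂]
  have hjoin : List.intercalate ['/'] (q :: qs) = t2 := by
    rw [← hq]; exact List.intercalate_splitOn t2 '/'
  simp [hall, hroot, hjoin]

-- the core equivalence on char lists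
theorem nfl_core (u : List Char) :
    nflLoopA u ["assets/".toList, "pdfs/".toList, "static/".toList]
      = nflGo (List.splitOn '/' u) u := by
  by_cases hp1 : "../../".toList <+: u
  · obtain ⟨t, rfl⟩ := hp1
    have hsp : List.splitOn '/' ("../../".toList ++ t)
        = [['.', '.'], ['.', '.']] ++ List.splitOn '/' t := by
      have e1 := nfl_splitOn_chunk ['.', '.'] ('.' :: '.' :: '/' :: t) (by simp)
      have e2 := nfl_splitOn_chunk ['.', '.'] t (by simp)
      simpa [e2] using e1
    rw [hsp]
    by_cases e1 : "assets/".toList <+: t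
    · obtain ⟨t2, rfl⟩ := e1
      rw [show ("assets/".toList ++ t2 : List Char) = ['a', 's', 's', 'e', 't', 's'] ++ '/' :: t2 by rfl,
        nfl_Bpos [['.', '.'], ['.', '.']] ['a', 's', 's', 'e', 't', 's'] t2 _ (by rfl) (by simp [nflIsDot]) (by decide) (by decide) (by simp)]
      simp [nflLoopA, PySem.Chars.startswith, List.isPrefixOf]
    by_cases e2 : "pdfs/".toList <+: t
    · obtain ⟨t2, rfl⟩ := e2
      rw [show ("pdfs/".toList ++ t2 : List Char) = ['p', 'd', 'f', 's'] ++ '/' :: t2 by rfl,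
        nfl_Bpos [['.', '.'], ['.', '.']] ['p', 'd', 'f', 's'] t2 _ (by rfl) (by simp [nflIsDot]) (by decide) (by decide) (by simp)]
      have w1 : ¬ ['a', 's', 's', 'e', 't', 's', '/'] <+: ("pdfs/".toList ++ t2 : List Char) := by
        simp [List.cons_prefix_cons]
      simp [nflLoopA, PySem.Chars.startswith, List.isPrefixOf_iff_prefix, w1, List.cons_prefix_cons]
    by_cases e3 : "static/".toList <+: t
    · obtain ⟨t2, rfl⟩ := e3
      rw [show ("static/".toList ++ t2 : List Char) = ['s', 't', 'a', 't', 'i', 'c'] ++ '/' :: t2 by rfl,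
        nfl_Bpos [['.', '.'], ['.', '.']] ['s', 't', 'a', 't', 'i', 'c'] t2 _ (by rfl) (by simp [nflIsDot]) (by decide) (by decide) (by simp)]
      simp [nflLoopA, PySem.Chars.startswith, List.isPrefixOf_iff_prefix, List.cons_prefix_cons]
    · rw [nfl_Bneg_dot22 e1 e2 e3]
      have E1 : ¬ (['a', 's', 's', 'e', 't', 's', '/'] : List Char) <+: t := e1
      have E2 : ¬ (['p', 'd', 'f', 's', '/'] : List Char) <+: t := e2
      have E3 : ¬ (['s', 't', 'a', 't', 'i', 'c', '/'] : List Char) <+: t := e3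
      simp [nflLoopA, PySem.Chars.startswith, List.isPrefixOf_iff_prefix, E1, E2, E3,
        List.cons_prefix_cons]
  by_cases hp2 : "../".toList <+: u
  · obtain ⟨t, rfl⟩ := hp2
    have hw : ¬ ("../".toList : List Char) <+: t := nfl_notpfx (p := "../".toList) hp1
    have hsp : List.splitOn '/' ("../".toList ++ t) = [['.', '.']] ++ List.splitOn '/' t :=
      nfl_splitOn_chunk ['.', '.'] t (by simp)
    rw [hsp]
    by_cases e1 : "assets/".toList <+: t
    · obtain ⟨t2, rfl⟩ := e1
      rw [show ("assets/".toList ++ t2 : List Char) = ['a', 's', 's', 'e', 't', 's'] ++ '/' :: t2 by rfl,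
        nfl_Bpos [['.', '.']] ['a', 's', 's', 'e', 't', 's'] t2 _ (by rfl) (by simp [nflIsDot]) (by decide) (by decide) (by simp)]
      have w1 : ¬ ['.', '.', '/', 'a', 's', 's', 'e', 't', 's', '/'] <+: ("assets/".toList ++ t2 : List Char) := by
        simp [List.cons_prefix_cons]
      simp [nflLoopA, PySem.Chars.startswith, List.isPrefixOf_iff_prefix, w1, List.cons_prefix_cons]
    by_cases e2 : "pdfs/".toList <+: t
    · obtain ⟨t2, rfl⟩ := e2
      rw [show ("pdfs/".toList ++ t2 : List Char) = ['p', 'd', 'f', 's'] ++ '/' :: t2 by rfl,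
        nfl_Bpos [['.', '.']] ['p', 'd', 'f', 's'] t2 _ (by rfl) (by simp [nflIsDot]) (by decide) (by decide) (by simp)]
      simp [nflLoopA, PySem.Chars.startswith, List.isPrefixOf_iff_prefix, List.cons_prefix_cons]
    by_cases e3 : "static/".toList <+: t
    · obtain ⟨t2, rfl⟩ := e3
      rw [show ("static/".toList ++ t2 : List Char) = ['s', 't', 'a', 't', 'i', 'c'] ++ '/' :: t2 by rfl,
        nfl_Bpos [['.', '.']] ['s', 't', 'a', 't', 'i', 'c'] t2 _ (by rfl) (by simp [nflIsDot]) (by decide) (by decide) (by simp)]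
      simp [nflLoopA, PySem.Chars.startswith, List.isPrefixOf_iff_prefix, List.cons_prefix_cons]
    · rw [nfl_Bneg_dot2 e1 e2 e3 hw]
      have E1 : ¬ (['a', 's', 's', 'e', 't', 's', '/'] : List Char) <+: t := e1
      have E2 : ¬ (['p', 'd', 'f', 's', '/'] : List Char) <+: t := e2
      have E3 : ¬ (['s', 't', 'a', 't', 'i', 'c', '/'] : List Char) <+: t := e3
      have w1 : ¬ ['.', '.', '/', 'a', 's', 's', 'e', 't', 's', '/'] <+: t := nfl_npfx_ext (by decide) hw
      have w2 : ¬ ['.', '.', '/', 'p', 'd', 'f', 's', '/'] <+: t := nfl_npfx_ext (by decide) hw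
      have w3 : ¬ ['.', '.', '/', 's', 't', 'a', 't', 'i', 'c', '/'] <+: t := nfl_npfx_ext (by decide) hw
      simp [nflLoopA, PySem.Chars.startswith, List.isPrefixOf_iff_prefix, E1, E2, E3, w1, w2, w3,
        List.cons_prefix_cons]
  by_cases hp3 : "./".toList <+: u
  · obtain ⟨t, rfl⟩ := hp3
    have hsp : List.splitOn '/' ("./".toList ++ t) = [['.']] ++ List.splitOn '/' t :=
      nfl_splitOn_chunk ['.'] t (by simp)
    rw [hsp]
    by_cases e1 : "assets/".toList <+: t
    · obtain ⟨t2, rfl⟩ := e1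
      rw [show ("assets/".toList ++ t2 : List Char) = ['a', 's', 's', 'e', 't', 's'] ++ '/' :: t2 by rfl,
        nfl_Bpos [['.']] ['a', 's', 's', 'e', 't', 's'] t2 _ (by rfl) (by simp [nflIsDot]) (by decide) (by decide) (by simp)]
      simp [nflLoopA, PySem.Chars.startswith, List.isPrefixOf_iff_prefix, List.cons_prefix_cons]
    by_cases e2 : "pdfs/".toList <+: t
    · obtain ⟨t2, rfl⟩ := e2
      rw [show ("pdfs/".toList ++ t2 : List Char) = ['p', 'd', 'f', 's'] ++ '/' :: t2 by rfl,
        nfl_Bpos [['.']] ['p', 'd', 'f', 's'] t2 _ (by rfl) (by simp [nflIsDot]) (by decide) (by decide) (by simp)]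
      simp [nflLoopA, PySem.Chars.startswith, List.isPrefixOf_iff_prefix, List.cons_prefix_cons]
    by_cases e3 : "static/".toList <+: t
    · obtain ⟨t2, rfl⟩ := e3
      rw [show ("static/".toList ++ t2 : List Char) = ['s', 't', 'a', 't', 'i', 'c'] ++ '/' :: t2 by rfl,
        nfl_Bpos [['.']] ['s', 't', 'a', 't', 'i', 'c'] t2 _ (by rfl) (by simp [nflIsDot]) (by decide) (by decide) (by simp)]
      simp [nflLoopA, PySem.Chars.startswith, List.isPrefixOf_iff_prefix, List.cons_prefix_cons]
    · rw [nfl_Bneg_dot1 e1 e2 e3]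
      have E1 : ¬ (['a', 's', 's', 'e', 't', 's', '/'] : List Char) <+: t := e1
      have E2 : ¬ (['p', 'd', 'f', 's', '/'] : List Char) <+: t := e2
      have E3 : ¬ (['s', 't', 'a', 't', 'i', 'c', '/'] : List Char) <+: t := e3
      simp [nflLoopA, PySem.Chars.startswith, List.isPrefixOf_iff_prefix, E1, E2, E3,
        List.cons_prefix_cons]
  · by_cases e1 : "assets/".toList <+: u
    · obtain ⟨t2, rfl⟩ := e1
      rw [show ("assets/".toList ++ t2 : List Char) = ['a', 's', 's', 'e', 't', 's'] ++ '/' :: t2 by rfl]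
      have := nfl_Bpos [] ['a', 's', 's', 'e', 't', 's'] t2 (['a', 's', 's', 'e', 't', 's'] ++ '/' :: t2) (by rfl) (by simp) (by decide) (by decide) (by simp)
      rw [show (([] : List (List Char)) ++ List.splitOn '/' (['a', 's', 's', 'e', 't', 's'] ++ '/' :: t2)) = List.splitOn '/' (['a', 's', 's', 'e', 't', 's'] ++ '/' :: t2) by simp] at this
      rw [this]
      simp [nflLoopA, PySem.Chars.startswith, List.isPrefixOf_iff_prefix, List.cons_prefix_cons]
    by_cases e2 : "pdfs/".toList <+: u
    · obtain ⟨t2, rfl⟩ := e2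
      rw [show ("pdfs/".toList ++ t2 : List Char) = ['p', 'd', 'f', 's'] ++ '/' :: t2 by rfl]
      have := nfl_Bpos [] ['p', 'd', 'f', 's'] t2 (['p', 'd', 'f', 's'] ++ '/' :: t2) (by rfl) (by simp) (by decide) (by decide) (by simp)
      rw [show (([] : List (List Char)) ++ List.splitOn '/' (['p', 'd', 'f', 's'] ++ '/' :: t2)) = List.splitOn '/' (['p', 'd', 'f', 's'] ++ '/' :: t2) by simp] at this
      rw [this]
      simp [nflLoopA, PySem.Chars.startswith, List.isPrefixOf_iff_prefix, List.cons_prefix_cons]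
    by_cases e3 : "static/".toList <+: u
    · obtain ⟨t2, rfl⟩ := e3
      rw [show ("static/".toList ++ t2 : List Char) = ['s', 't', 'a', 't', 'i', 'c'] ++ '/' :: t2 by rfl]
      have := nfl_Bpos [] ['s', 't', 'a', 't', 'i', 'c'] t2 (['s', 't', 'a', 't', 'i', 'c'] ++ '/' :: t2) (by rfl) (by simp) (by decide) (by decide) (by simp)
      rw [show (([] : List (List Char)) ++ List.splitOn '/' (['s', 't', 'a', 't', 'i', 'c'] ++ '/' :: t2)) = List.splitOn '/' (['s', 't', 'a', 't', 'i', 'c'] ++ '/' :: t2) by simp] at this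
      rw [this]
      simp [nflLoopA, PySem.Chars.startswith, List.isPrefixOf_iff_prefix, List.cons_prefix_cons]
    · rw [nfl_Bneg_nil e1 e2 e3 hp3 hp2]
      have E1 : ¬ (['a', 's', 's', 'e', 't', 's', '/'] : List Char) <+: u := e1
      have E2 : ¬ (['p', 'd', 'f', 's', '/'] : List Char) <+: u := e2
      have E3 : ¬ (['s', 't', 'a', 't', 'i', 'c', '/'] : List Char) <+: u := e3
      have a1 : ¬ ['.', '.', '/', '.', '.', '/', 'a', 's', 's', 'e', 't', 's', '/'] <+: u := nfl_npfx_ext (by decide) hp1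
      have a2 : ¬ ['.', '.', '/', '.', '.', '/', 'p', 'd', 'f', 's', '/'] <+: u := nfl_npfx_ext (by decide) hp1
      have a3 : ¬ ['.', '.', '/', '.', '.', '/', 's', 't', 'a', 't', 'i', 'c', '/'] <+: u := nfl_npfx_ext (by decide) hp1
      have b1 : ¬ ['.', '.', '/', 'a', 's', 's', 'e', 't', 's', '/'] <+: u := nfl_npfx_ext (by decide) hp2
      have b2 : ¬ ['.', '.', '/', 'p', 'd', 'f', 's', '/'] <+: u := nfl_npfx_ext (by decide) hp2
      have b3 : ¬ ['.', '.', '/', 's', 't', 'a', 't', 'i', 'c', '/'] <+: u := nfl_npfx_ext (by decide) hp2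
      have c1 : ¬ ['.', '/', 'a', 's', 's', 'e', 't', 's', '/'] <+: u := nfl_npfx_ext (by decide) hp3
      have c2 : ¬ ['.', '/', 'p', 'd', 'f', 's', '/'] <+: u := nfl_npfx_ext (by decide) hp3
      have c3 : ¬ ['.', '/', 's', 't', 'a', 't', 'i', 'c', '/'] <+: u := nfl_npfx_ext (by decide) hp3
      simp [nflLoopA, PySem.Chars.startswith, List.isPrefixOf_iff_prefix, E1, E2, E3,
        a1, a2, a3, b1, b2, b3, c1, c2, c3]

-- ===== VERDICT (by name: the statement is the Claim_ definition above) =====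
theorem normalize_from_lecture_py_spec : Claim_equal_normalize_from_lecture_py := by
  intro url _
  unfold Spec_normalize_from_lecture_py normalize_from_lecture_py normalize_from_lecture_py_alt
  split
  · rfl
  · rw [nfl_core]
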